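-- pv_equiv track=rewrite | github.com/RaggedR/rsk-transformer | rsk.py | rsk_forward_biword
-- ===== SOURCE A (Python) =====
-- import copy
--
-- Tableau = list[list[int]]
--
-- def schensted_insert(tableau: Tableau, value: int) -> tuple[Tableau, tuple[int, int]]:
--     """
--     Insert `value` into `tableau` using Schensted row insertion (bumping).
--
--     Returns the modified tableau and the (row, col) position where the new cell
--     was added — this is needed to build Q alongside P.
--
--     The algorithm: scan row 0 for the leftmost entry > value. If found, bump it
--     and recursively insert the bumped value into the next row. If no entry is
--     larger (value is larger than everything in the row), append to the end.
--     """
--     tableau = copy.deepcopy(tableau)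
--     row_idx = 0
--
--     while row_idx < len(tableau):
--         row = tableau[row_idx]
--         # Binary search for leftmost entry strictly greater than value
--         lo, hi = 0, len(row)
--         while lo < hi:
--             mid = (lo + hi) // 2
--             if row[mid] <= value:
--                 lo = mid + 1
--             else:
--                 hi = mid
--
--         if lo < len(row):
--             # Bump: replace row[lo] with value, continue inserting bumped value
--             bumped = row[lo]
--             row[lo] = value
--             value = bumped
--             row_idx += 1
--         else:
--             # No bumping needed: append to end of this row
--             row.append(value)
--             return tableau, (row_idx, len(row) - 1)
--
--     # Value was bumped out of all existing rows — start a new row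
--     tableau.append([value])
--     return tableau, (row_idx, 0)
--
-- def rsk_forward_biword(
--     top_line: list[int], bottom_line: list[int]
-- ) -> tuple[Tableau, Tableau]:
--     """
--     Forward RSK from a two-line array (biword).
--
--     Insert bottom_line values into P via Schensted insertion.
--     Record top_line values in Q at the new cell positions.
--
--     Returns (P, Q) where both are SSYT:
--       P is SSYT over {1,...,max(bottom_line)}
--       Q is SSYT over {1,...,max(top_line)}
--     """
--     P: Tableau = []
--     Q: Tableau = []
--
--     for top_val, bot_val in zip(top_line, bottom_line):
--         P, (row, col) = schensted_insert(P, bot_val)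
--         while len(Q) <= row:
--             Q.append([])
--         Q[row].append(top_val)
--
--     return P, Q
-- ===== SOURCE B (Python) =====
-- def _insert(tableau, value):
--     """Textbook recursive Schensted insertion: returns (new_tableau, (row, col))."""
--     if not tableau:
--         return [[value]], (0, 0)
--     row, rest = tableau[0], tableau[1:]
--     for j, x in enumerate(row):
--         if x > value:
--             new_row = row.copy()
--             new_row[j] = value
--             new_rest, (r, c) = _insert(rest, x)
--             return [new_row] + new_rest, (r + 1, c)
--     return [row + [value]] + rest, (0, len(row))
--
-- def rsk_forward_biword(top_line, bottom_line):
--     P = []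
--     Q = []
--     for top_val, bot_val in zip(top_line, bottom_line):
--         P, (row, col) = _insert(P, bot_val)
--         while len(Q) <= row:
--             Q.append([])
--         Q[row].append(top_val)
--     return P, Q
-- ===== Notes on version B (the rewrite author's own statement) =====
-- stated objective: alternative
-- what changed: schensted_insert's iterative row loop with in-row binary search is replaced by a textbook structural recursion over the rows with a linear bump scan (correct because tableau rows are weakly increasing, proved as an invariant); the biword loop is unchanged.
import Mathlib
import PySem

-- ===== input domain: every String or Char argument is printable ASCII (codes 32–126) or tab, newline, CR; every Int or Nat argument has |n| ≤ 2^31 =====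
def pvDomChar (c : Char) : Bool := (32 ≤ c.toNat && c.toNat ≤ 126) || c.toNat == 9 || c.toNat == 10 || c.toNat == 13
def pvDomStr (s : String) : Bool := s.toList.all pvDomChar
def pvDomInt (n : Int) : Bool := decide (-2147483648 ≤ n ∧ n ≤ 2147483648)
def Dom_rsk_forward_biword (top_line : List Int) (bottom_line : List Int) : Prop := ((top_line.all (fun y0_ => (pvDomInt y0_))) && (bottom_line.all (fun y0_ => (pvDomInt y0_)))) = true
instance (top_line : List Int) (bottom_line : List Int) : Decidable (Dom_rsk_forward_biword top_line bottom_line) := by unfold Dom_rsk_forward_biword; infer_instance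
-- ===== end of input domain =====

-- B replaces the iterative row loop + in-row binary search of A's schensted_insert by the
-- textbook structural recursion over rows with a linear bump scan; the biword loop is unchanged.
-- ===== PORT A =====

-- inner `while lo < hi` binary search of schensted_insert
def pvBsearch (row : List Int) (value : Int) (lo hi : Int) : Int :=
  if _h : lo < hi then
    let mid := PySem.Int.floordiv (lo + hi) 2
    if row.getD mid.toNat 0 ≤ value then pvBsearch row value (PySem.Int.floordiv (lo + hi) 2 + 1) hi
    else pvBsearch row value lo (PySem.Int.floordiv (lo + hi) 2)
  else lo
termination_by (hi - lo).toNat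
decreasing_by
  · have h1 := PySem.Int.floordiv_two_mid_bounds (le_of_lt _h)
    omega
  · have h1 := PySem.Int.floordiv_two_mid_bounds (le_of_lt _h)
    have h2 : PySem.Int.floordiv (lo + hi) 2 < hi := by
      rw [PySem.Int.floordiv_lt_iff_lt_mul (by omega)]; omega
    omega

-- outer `while row_idx < len(tableau)` loop of schensted_insert (positions stay internal to rsk)
def pvInsertA (tableau : List (List Int)) (value : Int) (row_idx : Nat) :
    List (List Int) × Nat × Nat :=
  if h : row_idx < tableau.length then
    let row := tableau[row_idx]
    let lo := (pvBsearch row value 0 row.length).toNat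
    if hlt : lo < row.length then
      pvInsertA (tableau.set row_idx (row.set lo value)) row[lo] (row_idx + 1)
    else
      (tableau.set row_idx (row ++ [value]), (row_idx, (row ++ [value]).length - 1))
  else
    (tableau ++ [[value]], (row_idx, 0))
termination_by tableau.length - row_idx
decreasing_by simp; omega

-- `while len(Q) <= row: Q.append([])`
def pvPadQ (Q : List (List Int)) (row : Nat) : List (List Int) :=
  if Q.length ≤ row then pvPadQ (Q ++ [[]]) row else Q
termination_by row + 1 - Q.length
decreasing_by simp; omega

def rsk_forward_biword (top_line : List Int) (bottom_line : List Int) :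
    List (List Int) × List (List Int) :=
  (top_line.zip bottom_line).foldl
    (fun PQ tv =>
      let step := pvInsertA PQ.1 tv.2 0
      let P := step.1
      let row := step.2.1
      let Q := pvPadQ PQ.2 row
      (P, Q.set row (Q.getD row [] ++ [tv.1])))
    ([], [])

-- ===== PORT B =====

-- `for j, x in enumerate(row): if x > value: ...` — first strictly greater entry with its index
def pvFindGT (row : List Int) (value : Int) : Option (Nat × Int) :=
  match row with
  | [] => none
  | x :: xs => if value < x then some (0, x) else (pvFindGT xs value).map (fun p => (p.1 + 1, p.2))

-- recursive `_insert` of Source B, structural on the list of rows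
def pvInsertB (tableau : List (List Int)) (value : Int) : List (List Int) × Nat × Nat :=
  match tableau with
  | [] => ([[value]], (0, 0))
  | row :: rest =>
    match pvFindGT row value with
    | some (j, x) =>
      let step := pvInsertB rest x
      (row.set j value :: step.1, (step.2.1 + 1, step.2.2))
    | none => ((row ++ [value]) :: rest, (0, row.length))

def rsk_forward_biword_alt (top_line : List Int) (bottom_line : List Int) :
    List (List Int) × List (List Int) :=
  (top_line.zip bottom_line).foldl
    (fun PQ tv =>
      let step := pvInsertB PQ.1 tv.2
      let P := step.1
      let row := step.2.1
      let Q := pvPadQ PQ.2 row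
      (P, Q.set row (Q.getD row [] ++ [tv.1])))
    ([], [])

-- ===== PRECONDITION & SPEC =====
def Spec_rsk_forward_biword (top_line : List Int) (bottom_line : List Int) (out : List (List Int) × List (List Int)) : Prop := out = rsk_forward_biword_alt top_line bottom_line
instance (top_line : List Int) (bottom_line : List Int) (out : List (List Int) × List (List Int)) : Decidable (Spec_rsk_forward_biword top_line bottom_line out) := by unfold Spec_rsk_forward_biword; infer_instance

-- ===== CLAIM (what is proved, stated in full; the proofs are below) =====
def Claim_equal_rsk_forward_biword : Prop := ∀ (top_line : List Int) (bottom_line : List Int), Dom_rsk_forward_biword top_line bottom_line → Spec_rsk_forward_biword top_line bottom_line (rsk_forward_biword top_line bottom_line)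

-- ===== LEMMAS AND PROOFS =====

-- a row is weakly increasing (invariant of every tableau built by the biword loop)
def pvRowS (r : List Int) : Prop := List.Pairwise (· ≤ ·) r

lemma pvFindGT_eq_findIdx (row : List Int) (value : Int) :
    pvFindGT row value =
      if h : row.findIdx (fun x => value < x) < row.length then
        some (row.findIdx (fun x => value < x), row[row.findIdx (fun x => value < x)])
      else none := by
  induction row with
  | nil => simp [pvFindGT]
  | cons x xs ih =>
    by_cases hx : value < x
    · simp [pvFindGT, hx, List.findIdx_cons]
    · have hd : decide (value < x) = false := by simp [hx]
      simp only [pvFindGT, if_neg hx, ih, List.findIdx_cons, hd, cond_false, List.length_cons]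
      by_cases h : xs.findIdx (fun x => value < x) < xs.length
      · simp [h, List.getElem_cons_succ]
      · simp [h, show ¬ (xs.findIdx (fun x => value < x) + 1 < xs.length + 1) by omega]

lemma pvFindIdx_spec (p : Int → Bool) (l : List Int) (k : Nat)
    (hk : k ≤ l.length)
    (hlt : ∀ i (h : i < l.length), i < k → ¬ p l[i])
    (hp : ∀ h : k < l.length, p l[k]) : l.findIdx p = k := by
  induction l generalizing k with
  | nil =>
    simp only [List.length_nil, Nat.le_zero] at hk
    subst hk; simp
  | cons x xs ih =>
    cases k with
    | zero =>
      have := hp (by simp)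
      simp_all [List.findIdx_cons]
    | succ k =>
      have hx : p x = false := by
        have h0 := hlt 0 (by simp) (by omega); simpa using h0
      simp only [List.findIdx_cons, hx, cond_false]
      rw [ih k (by simpa using hk) (fun i h hi => by simpa using hlt (i+1) (by simpa) (by omega))
        (fun h => by simpa using hp (by simpa))]

lemma pvRowS_mono {row : List Int} (hs : pvRowS row) (i j : Nat) (hj : j < row.length)
    (hij : i ≤ j) : row[i]'(by omega) ≤ row[j] := by
  rcases Nat.lt_or_ge i j with h | h
  · exact List.pairwise_iff_getElem.mp hs i j (by omega) hj h
  · have : i = j := by omega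
    subst this; exact le_refl _

lemma pvBsearch_eq (row : List Int) (value : Int) (hs : pvRowS row) :
    ∀ n (lo hi : Int), (hi - lo).toNat ≤ n → 0 ≤ lo → lo ≤ hi → hi ≤ row.length →
    (∀ i (h : i < row.length), (i : Int) < lo → row[i] ≤ value) →
    (∀ i (h : i < row.length), hi ≤ (i : Int) → value < row[i]) →
    pvBsearch row value lo hi = (row.findIdx (fun x => value < x) : Int) := by
  intro n
  induction n with
  | zero =>
    intro lo hi hn h0 hlh hhl hlo hhi
    have heq : lo = hi := by omega
    rw [pvBsearch, dif_neg (by omega)]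
    have : row.findIdx (fun x => value < x) = lo.toNat := by
      apply pvFindIdx_spec
      · omega
      · intro i h hi'
        simp only [decide_eq_true_eq, not_lt]
        exact hlo i h (by omega)
      · intro h
        simp only [decide_eq_true_eq]
        exact hhi lo.toNat h (by omega)
    rw [this]; omega
  | succ n ih =>
    intro lo hi hn h0 hlh hhl hlo hhi
    by_cases hlt : lo < hi
    · rw [pvBsearch, dif_pos hlt]
      have hmid := PySem.Int.floordiv_two_mid_bounds (le_of_lt hlt)
      have hmlt : PySem.Int.floordiv (lo + hi) 2 < hi := by
        rw [PySem.Int.floordiv_lt_iff_lt_mul (by omega)]; omega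
      set mid := PySem.Int.floordiv (lo + hi) 2 with hm
      have hmr : mid.toNat < row.length := by omega
      have hget : row.getD mid.toNat 0 = row[mid.toNat] := List.getD_eq_getElem row 0 hmr
      by_cases hc : row.getD mid.toNat 0 ≤ value
      · rw [if_pos hc]
        apply ih (mid + 1) hi (by omega) (by omega) (by omega) hhl
        · intro i h hi'
          calc row[i] ≤ row[mid.toNat] := pvRowS_mono hs i mid.toNat hmr (by omega)
            _ ≤ value := by rw [← hget]; exact hc
        · exact hhi
      · rw [if_neg hc]
        apply ih lo mid (by omega) h0 (by omega) (by omega) hlo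
        intro i h hi'
        calc value < row[mid.toNat] := by rw [← hget]; omega
          _ ≤ row[i] := pvRowS_mono hs mid.toNat i h (by omega)
    · have heq : lo = hi := by omega
      rw [pvBsearch, dif_neg (by omega)]
      have : row.findIdx (fun x => value < x) = lo.toNat := by
        apply pvFindIdx_spec
        · omega
        · intro i h hi'
          simp only [decide_eq_true_eq, not_lt]
          exact hlo i h (by omega)
        · intro h
          simp only [decide_eq_true_eq]
          exact hhi lo.toNat h (by omega)
      rw [this]; omega

lemma pvSet_append_cons (pre rest : List (List Int)) (row x : List Int) :
    (pre ++ row :: rest).set pre.length x = pre ++ x :: rest := by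
  rw [List.set_append]
  simp

lemma pvBsearch_full (row : List Int) (value : Int) (hs : pvRowS row) :
    pvBsearch row value 0 row.length = (row.findIdx (fun x => value < x) : Int) := by
  apply pvBsearch_eq row value hs row.length 0 row.length (by omega) (by omega) (by omega) (by omega)
  · intro i h hi'; omega
  · intro i h hi'; omega

lemma pvInsert_eq (rest : List (List Int)) (value : Int) (pre : List (List Int))
    (hs : ∀ r ∈ rest, pvRowS r) :
    pvInsertA (pre ++ rest) value pre.length =
      ((pre ++ (pvInsertB rest value).1,
        (pre.length + (pvInsertB rest value).2.1, (pvInsertB rest value).2.2))) := by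
  induction rest generalizing value pre with
  | nil =>
    rw [pvInsertA, dif_neg (by simp)]
    simp [pvInsertB]
  | cons row rest ih =>
    have hlen : pre.length < (pre ++ row :: rest).length := by simp
    rw [pvInsertA, dif_pos hlen]
    have hrow : (pre ++ row :: rest)[pre.length] = row := List.getElem_of_append rfl rfl
    simp only [hrow]
    have hb : (pvBsearch row value 0 row.length).toNat = row.findIdx (fun x => value < x) := by
      rw [pvBsearch_full row value (hs row (by simp))]; omega
    set J := row.findIdx (fun x => value < x) with hJ
    by_cases hlt : J < row.length
    · rw [dif_pos (by omega : (pvBsearch row value 0 row.length).toNat < row.length)]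
      simp only [hb]
      rw [pvSet_append_cons]
      have : pre ++ row.set J value :: rest = (pre ++ [row.set J value]) ++ rest := by
        simp
      rw [this]
      have hlen1 : pre.length + 1 = (pre ++ [row.set J value]).length := by simp
      rw [hlen1, ih row[J] (pre ++ [row.set J value]) (fun r hr => hs r (by simp [hr]))]
      simp only [pvInsertB, pvFindGT_eq_findIdx, ← hJ, dif_pos hlt]
      simp
      omega
    · rw [dif_neg (by omega : ¬ (pvBsearch row value 0 row.length).toNat < row.length)]
      rw [pvSet_append_cons]
      simp only [pvInsertB, pvFindGT_eq_findIdx, ← hJ, dif_neg hlt]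
      simp

lemma pvSetRow_sorted {row : List Int} (value : Int) (hs : pvRowS row)
    (hlt : row.findIdx (fun x => value < x) < row.length) :
    pvRowS (row.set (row.findIdx (fun x => value < x)) value) := by
  set J := row.findIdx (fun x => value < x) with hJ
  have hpJ : value < row[J] := by
    have := List.findIdx_getElem (w := hlt)
    simpa using this
  rw [pvRowS, List.pairwise_iff_getElem]
  intro i j hi hj hij
  simp only [List.length_set] at hi hj
  rw [List.getElem_set, List.getElem_set]
  by_cases hiJ : J = i
  · subst hiJ
    rw [if_pos rfl, if_neg (by omega)]
    exact le_of_lt (lt_of_lt_of_le hpJ (pvRowS_mono hs J j hj (by omega)))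
  · rw [if_neg hiJ]
    by_cases hjJ : J = j
    · subst hjJ
      rw [if_pos rfl]
      have hilt : i < List.findIdx (fun x => decide (value < x)) row := by omega
      have hfalse : (fun x => decide (value < x)) (row[i]'hi) = false :=
        List.not_of_lt_findIdx hilt
      simp only [decide_eq_false_iff_not, not_lt] at hfalse
      exact hfalse
    · rw [if_neg hjJ]
      exact pvRowS_mono hs i j hj (by omega)

lemma pvInsertB_sorted : ∀ (tableau : List (List Int)) (value : Int),
    (∀ r ∈ tableau, pvRowS r) → ∀ r ∈ (pvInsertB tableau value).1, pvRowS r := by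
  intro tableau
  induction tableau with
  | nil =>
    intro value hs r hr
    simp only [pvInsertB] at hr
    simp at hr
    subst hr
    exact List.pairwise_singleton _ _
  | cons row rest ih =>
    intro value hs r hr
    have hrow : pvRowS row := hs row (by simp)
    simp only [pvInsertB, pvFindGT_eq_findIdx] at hr
    by_cases hlt : row.findIdx (fun x => value < x) < row.length
    · rw [dif_pos hlt] at hr
      simp only [List.mem_cons] at hr
      rcases hr with hr | hr
      · subst hr; exact pvSetRow_sorted value hrow hlt
      · exact ih _ (fun r' hr' => hs r' (by simp [hr'])) r hr
    · rw [dif_neg hlt] at hr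
      simp only [List.mem_cons] at hr
      rcases hr with hr | hr
      · subst hr
        rw [pvRowS, List.pairwise_append]
        refine ⟨hrow, List.pairwise_singleton _ _, ?_⟩
        intro a ha b hb
        simp only [List.mem_singleton] at hb
        rw [hb]
        obtain ⟨i, hi, rfl⟩ := List.mem_iff_getElem.mp ha
        have hilt : i < List.findIdx (fun x => decide (value < x)) row := by omega
        have hfalse : (fun x => decide (value < x)) (row[i]'hi) = false :=
          List.not_of_lt_findIdx hilt
        simp only [decide_eq_false_iff_not, not_lt] at hfalse
        exact hfalse
      · exact hs r (by simp [hr])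

lemma pvFold_eq (pairs : List (Int × Int)) :
    ∀ (P Q : List (List Int)), (∀ r ∈ P, pvRowS r) →
    pairs.foldl
      (fun PQ tv =>
        let step := pvInsertA PQ.1 tv.2 0
        let P := step.1
        let row := step.2.1
        let Q := pvPadQ PQ.2 row
        (P, Q.set row (Q.getD row [] ++ [tv.1]))) (P, Q) =
    pairs.foldl
      (fun PQ tv =>
        let step := pvInsertB PQ.1 tv.2
        let P := step.1
        let row := step.2.1
        let Q := pvPadQ PQ.2 row
        (P, Q.set row (Q.getD row [] ++ [tv.1]))) (P, Q) := by
  induction pairs with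
  | nil => intro P Q _; rfl
  | cons tv pairs ih =>
    intro P Q hs
    simp only [List.foldl_cons]
    have hstep : pvInsertA P tv.2 0 =
        ((pvInsertB P tv.2).1, ((pvInsertB P tv.2).2.1, (pvInsertB P tv.2).2.2)) := by
      have := pvInsert_eq P tv.2 [] hs
      simpa using this
    rw [hstep]
    exact ih _ _ (pvInsertB_sorted P tv.2 hs)

-- ===== VERDICT (by name: the statement is the Claim_ definition above) =====
theorem rsk_forward_biword_spec : Claim_equal_rsk_forward_biword := by
  intro top_line bottom_line _
  unfold Spec_rsk_forward_biword rsk_forward_biword rsk_forward_biword_alt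
  exact pvFold_eq _ [] [] (by simp)
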